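-- pv_equiv track=rewrite | github.com/anpoli99/NyuProgTeamMeetings2022-23 | Week 8/solutions/A/A_doublepassword.py | doublepassword
-- ===== SOURCE A (Python) =====
-- def doublepassword(s,t):
--     # The input is small enough that we can use brute force
--     ans = 0
--     for i in range(10000):
--         p = str(i)
--         while len(p) < 4: p = "0" + p
--         okay = True
--         for j in range(4):
--             if s[j] != p[j] and t[j] != p[j]: okay = False
--         if okay: ans += 1
--     return ans
-- ===== SOURCE B (Python) =====
-- def doublepassword(s, t):
--     # Product over the 4 positions of the number of digits matching s or t there.
--     ans = 1
--     for j in range(4):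
--         a, b = s[j], t[j]
--         cnt = 0
--         if '0' <= a <= '9': cnt += 1
--         if '0' <= b <= '9' and b != a: cnt += 1
--         ans *= cnt
--     return ans
-- ===== Notes on version B (the rewrite author's own statement) =====
-- stated objective: faster
-- what changed: Replaces the brute-force scan of all 10000 four-digit strings with a closed-form product over the 4 positions of the number of digit choices matching s or t there.
import Mathlib
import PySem

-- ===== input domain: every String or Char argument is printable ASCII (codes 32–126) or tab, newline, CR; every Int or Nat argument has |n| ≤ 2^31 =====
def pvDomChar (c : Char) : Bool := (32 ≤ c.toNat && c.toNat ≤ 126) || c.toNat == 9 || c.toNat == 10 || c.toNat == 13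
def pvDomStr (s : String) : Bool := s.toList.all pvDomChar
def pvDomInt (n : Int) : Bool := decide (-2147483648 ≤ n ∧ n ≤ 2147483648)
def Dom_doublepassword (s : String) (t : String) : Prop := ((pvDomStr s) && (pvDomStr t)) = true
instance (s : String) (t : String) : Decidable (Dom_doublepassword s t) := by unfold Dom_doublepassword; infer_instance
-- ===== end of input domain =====

-- B replaces A's brute-force scan of all 10000 four-digit strings by the product,
-- over the 4 positions, of the number of digits matching s or t there (objective: faster).

-- ===== PORT A =====
-- `while len(p) < 4: p = "0" + p` as a fuel recursion; fuel 4 suffices (str(i) is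
-- nonempty, so the body runs at most 3 times) and only makes the while loop total.
def padA : Nat → List Char → List Char
  | 0, p => p
  | fuel+1, p => if p.length < 4 then padA fuel ('0' :: p) else p

def doublepassword (s : String) (t : String) : Int :=
  (PySem.List.pyRange 0 10000 1).foldl (fun ans i =>
    let p := padA 4 (PySem.Int.toChars i)
    let okay := (PySem.List.pyRange 0 4 1).foldl (fun okay j =>
      if PySem.List.pyGetD s.toList j ' ' ≠ PySem.List.pyGetD p j ' ' ∧
         PySem.List.pyGetD t.toList j ' ' ≠ PySem.List.pyGetD p j ' ' then false else okay) true
    if okay then ans + 1 else ans) 0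

-- ===== PORT B =====
def doublepassword_alt (s : String) (t : String) : Int :=
  (PySem.List.pyRange 0 4 1).foldl (fun ans j =>
    let a := PySem.List.pyGetD s.toList j ' '
    let b := PySem.List.pyGetD t.toList j ' '
    let cnt : Int := 0
    let cnt := if '0' ≤ a ∧ a ≤ '9' then cnt + 1 else cnt
    let cnt := if ('0' ≤ b ∧ b ≤ '9') ∧ b ≠ a then cnt + 1 else cnt
    ans * cnt) 1

-- ===== PRECONDITION & SPEC =====
-- Pre_: both strings have at least 4 characters; on shorter input the Python A
-- (and B) raises IndexError at s[j] / t[j].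
def Pre_doublepassword (s : String) (t : String) : Prop :=
  4 ≤ s.toList.length ∧ 4 ≤ t.toList.length
instance (s : String) (t : String) : Decidable (Pre_doublepassword s t) := by
  unfold Pre_doublepassword; infer_instance
def pvWitness_doublepassword : String × String := ("1234", "5678")
def Spec_doublepassword (s : String) (t : String) (out : Int) : Prop := out = doublepassword_alt s t
instance (s : String) (t : String) (out : Int) : Decidable (Spec_doublepassword s t out) := by
  unfold Spec_doublepassword; infer_instance

-- ===== CLAIM (what is proved, stated in full; the proofs are below) =====
def Claim_equal_doublepassword : Prop := ∀ (s : String) (t : String), Dom_doublepassword s t → Pre_doublepassword s t → Spec_doublepassword s t (doublepassword s t)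

-- ===== LEMMAS AND PROOFS =====

-- the character of digit d
def dch (d : Nat) : Char := Char.ofNat (48 + d)
-- per-position indicator: digit d matches s or t at this position
def ind (a b : Char) (d : Nat) : Int := if a = dch d ∨ b = dch d then 1 else 0
-- per-position count of B
def cntC (a b : Char) : Int :=
  (if '0' ≤ a ∧ a ≤ '9' then 1 else 0) + (if ('0' ≤ b ∧ b ≤ '9') ∧ b ≠ a then 1 else 0)

theorem toDigitsCore_step (b f n : Nat) (acc : List Char) :
    Nat.toDigitsCore b (f+1) n acc =
      if n / b = 0 then Nat.digitChar (n % b) :: acc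
      else Nat.toDigitsCore b f (n / b) (Nat.digitChar (n % b) :: acc) := rfl

theorem toDigitsCore_small (n : Nat) (acc : List Char) (h : n < 10) :
    (Nat.digitChar (n % 10) :: acc)
      = (if n = 0 then ['0'] else (Nat.digits 10 n).reverse.map Nat.digitChar) ++ acc := by
  by_cases h0 : n = 0
  · subst h0; rfl
  · rw [if_neg h0, Nat.digits_def' (by norm_num) (Nat.pos_of_ne_zero h0),
        Nat.div_eq_of_lt h, Nat.digits_zero, Nat.mod_eq_of_lt h]
    simp

theorem toDigitsCore_eq (f : Nat) : ∀ (n : Nat) (acc : List Char), n < 10 ^ (f + 1) →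
    Nat.toDigitsCore 10 (f + 1) n acc =
      (if n = 0 then ['0'] else (Nat.digits 10 n).reverse.map Nat.digitChar) ++ acc := by
  induction f with
  | zero =>
    intro n acc hn
    have h0 : n / 10 = 0 := Nat.div_eq_of_lt (by simpa using hn)
    rw [toDigitsCore_step, if_pos h0]
    exact toDigitsCore_small n acc (by simpa using hn)
  | succ f ih =>
    intro n acc hn
    by_cases h0 : n / 10 = 0
    · rw [toDigitsCore_step, if_pos h0]
      exact toDigitsCore_small n acc (by omega)
    · have hlt : n / 10 < 10 ^ (f + 1) := by
        rw [pow_succ'] at hn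
        exact Nat.div_lt_of_lt_mul hn
      rw [toDigitsCore_step, if_neg h0]
      rw [ih (n / 10) _ hlt, if_neg h0]
      have hn0 : n ≠ 0 := by omega
      rw [if_neg hn0, Nat.digits_def' (by norm_num : (1:Nat) < 10) (Nat.pos_of_ne_zero hn0)]
      simp

theorem toChars_natCast (n : Nat) : PySem.Int.toChars (n : Int) =
    if n = 0 then ['0'] else (Nat.digits 10 n).reverse.map Nat.digitChar := by
  have h1 : PySem.Int.toChars (n : Int) = Nat.toDigits 10 n := by simp [PySem.Int.toChars]
  have h2 : Nat.toDigits 10 n = Nat.toDigitsCore 10 (n + 1) n [] := rfl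
  have h3 : n < 10 ^ (n + 1) :=
    lt_of_lt_of_le (Nat.lt_pow_self (by norm_num)) (Nat.pow_le_pow_right (by norm_num) (Nat.le_succ n))
  rw [h1, h2, toDigitsCore_eq n n [] h3, List.append_nil]

theorem digitChar_eq_dch (d : Nat) (hd : d < 10) : Nat.digitChar d = dch d := by
  interval_cases d <;> rfl

theorem toNat_dch (d : Nat) (hd : d < 10) : (dch d).toNat = 48 + d := by
  interval_cases d <;> rfl

theorem char_eq_toNat (a b : Char) : a = b ↔ a.toNat = b.toNat :=
  ⟨fun h => congrArg _ h, fun h => Char.ext (UInt32.toNat.inj h)⟩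

theorem char_eq_dch (a : Char) (d : Nat) (hd : d < 10) : a = dch d ↔ a.toNat = 48 + d := by
  rw [char_eq_toNat, toNat_dch d hd]

theorem char_le_left (a : Char) : ('0' ≤ a) ↔ 48 ≤ a.toNat := by
  rw [Char.le_def, UInt32.le_iff_toNat_le]; rfl

theorem char_le_right (a : Char) : (a ≤ '9') ↔ a.toNat ≤ 57 := by
  rw [Char.le_def, UInt32.le_iff_toNat_le]; rfl

theorem pad1 (c : Char) : padA 4 [c] = ['0','0','0',c] := rfl
theorem pad2 (c d : Char) : padA 4 [c,d] = ['0','0',c,d] := rfl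
theorem pad3 (c d e : Char) : padA 4 [c,d,e] = ['0',c,d,e] := rfl
theorem pad4 (c d e f : Char) : padA 4 [c,d,e,f] = [c,d,e,f] := rfl

theorem pad_eq (n : Nat) (hn : n < 10000) :
    padA 4 (PySem.Int.toChars (n : Int)) =
      [dch (n/1000), dch (n/100%10), dch (n/10%10), dch (n%10)] := by
  rw [toChars_natCast]
  by_cases h0 : n = 0
  · subst h0; decide
  · rw [if_neg h0]
    have h10 : (1:Nat) < 10 := by norm_num
    rcases Nat.lt_or_ge n 10 with h | h
    · rw [Nat.digits_def' h10 (by omega), show n / 10 = 0 by omega, Nat.digits_zero]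
      simp only [List.reverse_cons, List.reverse_nil, List.nil_append, List.map_cons,
        List.map_nil, pad1]
      rw [digitChar_eq_dch _ (by omega), show n % 10 = n by omega,
        show n / 1000 = 0 by omega, show n / 100 % 10 = 0 by omega,
        show (0:Nat) % 10 = 0 from rfl, show (dch 0) = '0' from rfl]
    · rcases Nat.lt_or_ge n 100 with h' | h'
      · rw [Nat.digits_def' h10 (by omega), Nat.digits_def' h10 (by omega),
          show n / 10 / 10 = 0 by omega, Nat.digits_zero]
        simp only [List.reverse_cons, List.reverse_nil, List.nil_append, List.map_cons,
          List.map_nil, List.cons_append, List.nil_append, pad2]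
        rw [digitChar_eq_dch (n % 10) (by omega), digitChar_eq_dch (n / 10 % 10) (by omega),
          show n / 1000 = 0 by omega, show n / 100 % 10 = 0 by omega,
          show (dch 0) = '0' from rfl]
      · rcases Nat.lt_or_ge n 1000 with h'' | h''
        · rw [Nat.digits_def' h10 (by omega), Nat.digits_def' h10 (by omega),
            Nat.digits_def' h10 (by omega), show n / 10 / 10 / 10 = 0 by omega,
            Nat.digits_zero]
          simp only [List.reverse_cons, List.reverse_nil, List.nil_append, List.map_cons,
            List.map_nil, List.cons_append, List.nil_append, pad3]
          rw [digitChar_eq_dch (n % 10) (by omega), digitChar_eq_dch (n / 10 % 10) (by omega),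
            digitChar_eq_dch (n / 10 / 10 % 10) (by omega),
            show n / 10 / 10 % 10 = n / 100 % 10 by omega,
            show n / 1000 = 0 by omega, show (dch 0) = '0' from rfl]
        · rw [Nat.digits_def' h10 (by omega), Nat.digits_def' h10 (by omega),
            Nat.digits_def' h10 (by omega), Nat.digits_def' h10 (by omega),
            show n / 10 / 10 / 10 / 10 = 0 by omega, Nat.digits_zero]
          simp only [List.reverse_cons, List.reverse_nil, List.nil_append, List.map_cons,
            List.map_nil, List.cons_append, List.nil_append, pad4]
          rw [digitChar_eq_dch (n % 10) (by omega), digitChar_eq_dch (n / 10 % 10) (by omega),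
            digitChar_eq_dch (n / 10 / 10 % 10) (by omega),
            digitChar_eq_dch (n / 10 / 10 / 10 % 10) (by omega),
            show n / 10 / 10 % 10 = n / 100 % 10 by omega,
            show n / 10 / 10 / 10 % 10 = n / 1000 by omega]

theorem sum_range_mul (f : Nat → Int) (N M : Nat) :
    ((List.range (N*M)).map f).sum
      = ((List.range N).map (fun a => ((List.range M).map (fun b => f (a*M+b))).sum)).sum := by
  induction N with
  | zero => simp
  | succ N ih =>
    rw [Nat.succ_mul, List.range_add, List.map_append, List.sum_append, ih,
        List.range_succ, List.map_append, List.sum_append]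
    simp [List.map_map, Function.comp_def]

theorem split_sum (e g : Nat → Int) (N M : Nat) :
    ((List.range (N*M)).map (fun n => e (n/M) * g (n%M))).sum
      = ((List.range N).map e).sum * ((List.range M).map g).sum := by
  rcases Nat.eq_zero_or_pos M with hM | hM
  · subst hM; simp
  · rw [sum_range_mul]
    have h1 : ∀ a ∈ List.range N,
        ((List.range M).map (fun b => e ((a*M+b)/M) * g ((a*M+b)%M))).sum
          = e a * ((List.range M).map g).sum := by
      intro a _
      rw [List.map_congr_left (g := fun b => e a * g b), List.sum_map_mul_left]
      intro b hb
      rw [List.mem_range] at hb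
      have hdiv : (a*M+b)/M = a := by
        rw [Nat.add_comm, Nat.add_mul_div_right _ _ hM, Nat.div_eq_of_lt hb]; omega
      have hmod : (a*M+b)%M = b := by
        rw [Nat.add_comm, Nat.add_mul_mod_self_right, Nat.mod_eq_of_lt hb]
      rw [hdiv, hmod]
    rw [List.map_congr_left h1, List.sum_map_mul_right]

theorem sum_ind (x L : Nat) : ∀ n : Nat,
    ((List.range n).map (fun d => if x = L + d then (1:Int) else 0)).sum
      = if L ≤ x ∧ x < L + n then 1 else 0 := by
  intro n
  induction n with
  | zero => rw [if_neg (by omega)]; simp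
  | succ n ih =>
    rw [List.range_succ, List.map_append, List.sum_append, ih]
    simp only [List.map_cons, List.map_nil, List.sum_cons, List.sum_nil]
    split_ifs <;> omega

theorem sum_ind2 (x y L : Nat) : ∀ n : Nat,
    ((List.range n).map (fun d => if x = L + d ∧ y = L + d then (1:Int) else 0)).sum
      = if x = y ∧ L ≤ x ∧ x < L + n then 1 else 0 := by
  intro n
  induction n with
  | zero => rw [if_neg (by omega)]; simp
  | succ n ih =>
    rw [List.range_succ, List.map_append, List.sum_append, ih]
    simp only [List.map_cons, List.map_nil, List.sum_cons, List.sum_nil]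
    split_ifs <;> omega

theorem sum_map_add3 (l : List Nat) (f g h : Nat → Int) :
    (l.map (fun d => f d + g d - h d)).sum = (l.map f).sum + (l.map g).sum - (l.map h).sum := by
  induction l with
  | nil => simp
  | cons x l ih => simp [ih]; ring

theorem sum_I (a b : Char) : ((List.range 10).map (ind a b)).sum = cntC a b := by
  have key : ∀ d ∈ List.range 10, ind a b d =
      (if a.toNat = 48 + d then (1:Int) else 0) + (if b.toNat = 48 + d then 1 else 0)
        - (if a.toNat = 48 + d ∧ b.toNat = 48 + d then 1 else 0) := by
    intro d hd
    rw [List.mem_range] at hd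
    rw [ind]
    simp only [char_eq_dch a d hd, char_eq_dch b d hd]
    by_cases h1 : a.toNat = 48 + d <;> by_cases h2 : b.toNat = 48 + d <;> simp [h1, h2]
  rw [List.map_congr_left key, sum_map_add3, sum_ind, sum_ind, sum_ind2]
  rw [cntC]
  simp only [char_le_left, char_le_right, ne_eq, char_eq_toNat]
  split_ifs <;> omega

theorem exists_four (l : List Char) (h : 4 ≤ l.length) :
    ∃ x0 x1 x2 x3 r, l = x0::x1::x2::x3::r := by
  rcases l with _|⟨x0, _|⟨x1, _|⟨x2, _|⟨x3, r⟩⟩⟩⟩ <;> simp at h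
  exact ⟨x0, x1, x2, x3, r, rfl⟩

theorem getD0 (x0 x1 x2 x3 : Char) (r : List Char) :
    PySem.List.pyGetD (x0::x1::x2::x3::r) (0:Int) ' ' = x0 := by
  simp [PySem.List.pyGetD, PySem.List.pyGet?, PySem.List.pyIdx?]
  rw [if_pos (by omega)]; simp
theorem getD1 (x0 x1 x2 x3 : Char) (r : List Char) :
    PySem.List.pyGetD (x0::x1::x2::x3::r) (1:Int) ' ' = x1 := by
  simp [PySem.List.pyGetD, PySem.List.pyGet?, PySem.List.pyIdx?]
  rw [if_pos (by omega)]; simp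
theorem getD2 (x0 x1 x2 x3 : Char) (r : List Char) :
    PySem.List.pyGetD (x0::x1::x2::x3::r) (2:Int) ' ' = x2 := by
  simp [PySem.List.pyGetD, PySem.List.pyGet?, PySem.List.pyIdx?]
  rw [if_pos (by omega)]; simp
theorem getD3 (x0 x1 x2 x3 : Char) (r : List Char) :
    PySem.List.pyGetD (x0::x1::x2::x3::r) (3:Int) ' ' = x3 := by
  simp [PySem.List.pyGetD, PySem.List.pyGet?, PySem.List.pyIdx?]
  rw [if_pos (by omega)]; simp

theorem foldl_if_count (q : Int → Bool) : ∀ (l : List Int) (a : Int),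
    l.foldl (fun ans i => if q i then ans + 1 else ans) a
      = a + (l.map (fun i => if q i then (1:Int) else 0)).sum := by
  intro l
  induction l with
  | nil => simp
  | cons x l ih =>
    intro a
    simp only [List.foldl_cons, List.map_cons, List.sum_cons, ih]
    split_ifs <;> ring

theorem h4range : PySem.List.pyRange 0 4 1 = [0, 1, 2, 3] := by decide

theorem A_eq (s t : String) (a0 a1 a2 a3 b0 b1 b2 b3 : Char) (sr tr : List Char)
    (hs : s.toList = a0::a1::a2::a3::sr) (ht : t.toList = b0::b1::b2::b3::tr) :
    doublepassword s t
      = ((List.range 10).map (ind a0 b0)).sum * (((List.range 10).map (ind a1 b1)).sum *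
         (((List.range 10).map (ind a2 b2)).sum * ((List.range 10).map (ind a3 b3)).sum)) := by
  unfold doublepassword
  rw [hs, ht, h4range]
  simp only []
  rw [foldl_if_count]
  rw [PySem.List.pyRange_one, show ((10000:Int) - 0).toNat = 10000 by decide, List.map_map]
  have hpoint : ∀ k ∈ List.range 10000,
      ((fun i => if
          ([0,1,2,3].foldl (fun okay j =>
            if PySem.List.pyGetD (a0::a1::a2::a3::sr) j ' ' ≠ PySem.List.pyGetD (padA 4 (PySem.Int.toChars i)) j ' ' ∧
               PySem.List.pyGetD (b0::b1::b2::b3::tr) j ' ' ≠ PySem.List.pyGetD (padA 4 (PySem.Int.toChars i)) j ' '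
            then false else okay) true)
          then (1:Int) else 0) ∘ fun k : Nat => (0:Int) + ↑k) k
        = ind a0 b0 (k/1000) * (ind a1 b1 (k%1000/100) *
            (ind a2 b2 (k%1000%100/10) * ind a3 b3 (k%1000%100%10))) := by
    intro k hk
    rw [List.mem_range] at hk
    simp only [Function.comp_def, zero_add]
    rw [pad_eq k hk]
    simp only [List.foldl_cons, List.foldl_nil, getD0, getD1, getD2, getD3]
    have hc : ∀ (x y c : Char), (x ≠ c ∧ y ≠ c) ↔ ¬(x = c ∨ y = c) := by
      intro x y c; tauto
    simp only [hc]
    rw [show k % 1000 / 100 = k / 100 % 10 by omega,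
        show k % 1000 % 100 / 10 = k / 10 % 10 by omega,
        show k % 1000 % 100 % 10 = k % 10 by omega]
    by_cases h0 : a0 = dch (k/1000) ∨ b0 = dch (k/1000) <;>
    by_cases h1 : a1 = dch (k/100%10) ∨ b1 = dch (k/100%10) <;>
    by_cases h2 : a2 = dch (k/10%10) ∨ b2 = dch (k/10%10) <;>
    by_cases h3 : a3 = dch (k%10) ∨ b3 = dch (k%10) <;>
    simp [ind, h0, h1, h2, h3]
  rw [List.map_congr_left hpoint]
  have hsplit1 := split_sum (ind a0 b0)
    (fun r => ind a1 b1 (r/100) * (ind a2 b2 (r%100/10) * ind a3 b3 (r%100%10))) 10 1000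
  have hsplit2 := split_sum (ind a1 b1) (fun q => ind a2 b2 (q/10) * ind a3 b3 (q%10)) 10 100
  have hsplit3 := split_sum (ind a2 b2) (ind a3 b3) 10 10
  simp only [] at hsplit1 hsplit2 hsplit3
  rw [show (10000:Nat) = 10 * 1000 from rfl, hsplit1,
      show (1000:Nat) = 10 * 100 from rfl, hsplit2,
      show (100:Nat) = 10 * 10 from rfl, hsplit3]
  ring

theorem cnt_step (P Q : Prop) [Decidable P] [Decidable Q] :
    (if Q then (if P then (0:Int)+1 else 0)+1 else (if P then (0:Int)+1 else 0))
      = (if P then (1:Int) else 0) + (if Q then 1 else 0) := by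
  split_ifs <;> ring

theorem B_eq (s t : String) (a0 a1 a2 a3 b0 b1 b2 b3 : Char) (sr tr : List Char)
    (hs : s.toList = a0::a1::a2::a3::sr) (ht : t.toList = b0::b1::b2::b3::tr) :
    doublepassword_alt s t = cntC a0 b0 * (cntC a1 b1 * (cntC a2 b2 * cntC a3 b3)) := by
  unfold doublepassword_alt
  rw [hs, ht, h4range]
  simp only [List.foldl_cons, List.foldl_nil, getD0, getD1, getD2, getD3]
  rw [cnt_step, cnt_step, cnt_step, cnt_step]
  simp only [cntC]
  ring

-- ===== VERDICT (by name: the statement is the Claim_ definition above) =====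
theorem doublepassword_spec : Claim_equal_doublepassword := by
  intro s t _ hpre
  obtain ⟨hls, hlt⟩ := hpre
  obtain ⟨a0, a1, a2, a3, sr, hs⟩ := exists_four _ hls
  obtain ⟨b0, b1, b2, b3, tr, ht⟩ := exists_four _ hlt
  unfold Spec_doublepassword
  rw [A_eq s t a0 a1 a2 a3 b0 b1 b2 b3 sr tr hs ht,
      B_eq s t a0 a1 a2 a3 b0 b1 b2 b3 sr tr hs ht,
      sum_I, sum_I, sum_I, sum_I]
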